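-- pv_equiv track=rewrite | github.com/enorenio/SocialScenarioGPT | utils/metrics.py | apply_effects
-- ===== SOURCE A (Python) =====
-- from typing import Any, Dict, List, Optional, Tuple
--
-- def apply_effects(
--     knowledge_base: List[str],
--     effects: List[str],
-- ) -> List[str]:
--     """Apply effects to update knowledge base."""
--     # Parse into key-value pairs
--     kb_dict = {}
--     for item in knowledge_base:
--         if "=" in item:
--             key, val = item.split("=", 1)
--             kb_dict[key.strip()] = val.strip()
--
--     effect_dict = {}
--     for item in effects:
--         if "=" in item:
--             key, val = item.split("=", 1)
--             effect_dict[key.strip()] = val.strip()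
--
--     # Apply effects
--     for key, val in effect_dict.items():
--         kb_dict[key] = val
--
--     return [f"{k}={v}" for k, v in kb_dict.items()]
-- ===== SOURCE B (Python) =====
-- from typing import List
--
--
-- def apply_effects(
--     knowledge_base: List[str],
--     effects: List[str],
-- ) -> List[str]:
--     """Apply effects to update knowledge base (no dicts: positional scan + reverse lookup)."""
--     # Parse everything into an ordered list of (key, value) pairs.
--     pairs = []
--     for item in knowledge_base + effects:
--         if "=" in item:
--             key, val = item.split("=", 1)
--             pairs.append((key.strip(), val.strip()))
--     # Emit one line per key, in order of first occurrence; the value is the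
--     # LAST assignment to that key, found by scanning the pairs backwards.
--     out = []
--     seen = set()
--     for k, _ in pairs:
--         if k not in seen:
--             seen.add(k)
--             for k2, v2 in reversed(pairs):
--                 if k2 == k:
--                     out.append(f"{k}={v2}")
--                     break
--     return out
-- ===== Notes on version B (the rewrite author's own statement) =====
-- stated objective: alternative
-- what changed: B uses no dicts at all: it parses everything into an ordered pair list, then emits each key at its first occurrence with the value found by a backwards scan (last assignment wins), whereas A builds two dicts and overlays one onto the other.
import Mathlib
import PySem

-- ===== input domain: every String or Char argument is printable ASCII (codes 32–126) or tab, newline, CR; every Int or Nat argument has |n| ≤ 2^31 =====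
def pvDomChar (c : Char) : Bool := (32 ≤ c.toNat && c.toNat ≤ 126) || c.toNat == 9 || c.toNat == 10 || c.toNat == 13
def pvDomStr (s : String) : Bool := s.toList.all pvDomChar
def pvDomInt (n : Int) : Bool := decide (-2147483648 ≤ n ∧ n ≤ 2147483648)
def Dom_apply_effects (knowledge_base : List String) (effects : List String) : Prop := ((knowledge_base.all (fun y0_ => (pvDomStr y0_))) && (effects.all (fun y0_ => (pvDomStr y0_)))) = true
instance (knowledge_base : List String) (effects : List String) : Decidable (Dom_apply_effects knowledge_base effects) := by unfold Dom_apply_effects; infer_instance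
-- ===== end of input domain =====

-- B uses no dict at all: it parses everything into one ordered pair list, then emits each key
-- at its first occurrence with the value found by a backwards scan (last assignment wins);
-- objective: alternative (dict-free algorithm, not claimed faster).

-- ===== PORT A =====
-- A-side helper: the body of A's parse loops ('if "=" in item: key, val = item.split("=", 1); d[key.strip()] = val.strip()')
def applyEffectsParseStep (d : PySem.Dict String String) (item : String) : PySem.Dict String String :=
  if PySem.Str.isIn "=" item then
    match PySem.Str.splitMax? item "=" 1 with
    | some [key, val] => d.insert (PySem.Str.strip key) (PySem.Str.strip val)
    | _ => d
  else d

def apply_effects (knowledge_base : List String) (effects : List String) : List String :=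
  let kb_dict := knowledge_base.foldl applyEffectsParseStep PySem.Dict.empty
  let effect_dict := effects.foldl applyEffectsParseStep PySem.Dict.empty
  let final := effect_dict.items.foldl (fun d p => d.insert p.1 p.2) kb_dict
  final.items.map (fun kv => kv.1 ++ "=" ++ kv.2)

-- ===== PORT B =====
-- B-side helper: B's first loop, collecting the parsed (key, value) pairs in order
def pvPairsOf (items : List String) : List (String × String) :=
  items.foldl (fun pairs item =>
    if PySem.Str.isIn "=" item then
      match PySem.Str.splitMax? item "=" 1 with
      | some [key, val] => pairs ++ [(PySem.Str.strip key, PySem.Str.strip val)]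
      | _ => pairs
    else pairs) []

-- B-side helper: B's second loop ('for k, _ in pairs: if k not in seen: seen.add(k);
-- for k2, v2 in reversed(pairs): if k2 == k: out.append(f"{k}={v2}"); break')
def pvScan : List (String × String) → PySem.Set String → List (String × String) → List String
  | [], _, _ => []
  | (k, _) :: rest, seen, pairs =>
    if PySem.Set.contains seen k then pvScan rest seen pairs
    else
      match pairs.reverse.find? (fun p => p.1 == k) with
      | some p => (k ++ "=" ++ p.2) :: pvScan rest (PySem.Set.add seen k) pairs
      | none => pvScan rest (PySem.Set.add seen k) pairs

def apply_effects_alt (knowledge_base : List String) (effects : List String) : List String :=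
  let pairs := pvPairsOf (knowledge_base ++ effects)
  pvScan pairs PySem.Set.empty pairs

-- ===== PRECONDITION & SPEC =====
def Spec_apply_effects (knowledge_base : List String) (effects : List String) (out : List String) : Prop := out = apply_effects_alt knowledge_base effects
instance (knowledge_base : List String) (effects : List String) (out : List String) : Decidable (Spec_apply_effects knowledge_base effects out) := by unfold Spec_apply_effects; infer_instance

-- ===== CLAIM (what is proved, stated in full; the proofs are below) =====
def Claim_equal_apply_effects : Prop := ∀ (knowledge_base : List String) (effects : List String), Dom_apply_effects knowledge_base effects → Spec_apply_effects knowledge_base effects (apply_effects knowledge_base effects)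

-- ===== LEMMAS AND PROOFS =====

def pvParse (item : String) : Option (String × String) :=
  if PySem.Str.isIn "=" item then
    match PySem.Str.splitMax? item "=" 1 with
    | some [key, val] => some (PySem.Str.strip key, PySem.Str.strip val)
    | _ => none
  else none

theorem pvStep_eq_parse (d : PySem.Dict String String) (a : String) :
    applyEffectsParseStep d a = match pvParse a with
      | some p => d.insert p.1 p.2
      | none => d := by
  unfold applyEffectsParseStep pvParse
  cases PySem.Str.isIn "=" a
  · rfl
  · simp only [if_true]
    rcases PySem.Str.splitMax? a "=" 1 with _ | ⟨_ | ⟨k, _ | ⟨v, _ | _⟩⟩⟩ <;> rfl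

theorem pv_foldl_step_eq (l : List String) :
    ∀ d : PySem.Dict String String,
      l.foldl applyEffectsParseStep d = (l.filterMap pvParse).foldl (fun d p => d.insert p.1 p.2) d := by
  induction l with
  | nil => intro d; rfl
  | cons a t ih =>
    intro d
    simp only [List.foldl_cons, List.filterMap_cons]
    rw [pvStep_eq_parse]
    cases hp : pvParse a <;> simp [ih]

-- B's parse loop collects exactly the parsed pairs
theorem pvPairsOf_eq (l : List String) :
    ∀ acc : List (String × String),
      l.foldl (fun pairs item =>
        if PySem.Str.isIn "=" item then
          match PySem.Str.splitMax? item "=" 1 with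
          | some [key, val] => pairs ++ [(PySem.Str.strip key, PySem.Str.strip val)]
          | _ => pairs
        else pairs) acc = acc ++ l.filterMap pvParse := by
  induction l with
  | nil => intro acc; simp
  | cons a t ih =>
    intro acc
    simp only [List.foldl_cons, List.filterMap_cons]
    have hstep : (if PySem.Str.isIn "=" a then
        match PySem.Str.splitMax? a "=" 1 with
        | some [key, val] => acc ++ [(PySem.Str.strip key, PySem.Str.strip val)]
        | _ => acc
      else acc) = acc ++ (pvParse a).toList := by
      unfold pvParse
      cases PySem.Str.isIn "=" a
      · simp
      · simp only [if_true]
        rcases PySem.Str.splitMax? a "=" 1 with _ | ⟨_ | ⟨k, _ | ⟨v, _ | _⟩⟩⟩ <;> simp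
    rw [hstep, ih]
    cases hp : pvParse a <;> simp

-- Two inserts at distinct keys commute as dicts when the second key is already present.
theorem pv_insert_comm {κ ν : Type} [BEq κ] [LawfulBEq κ] (d : PySem.Dict κ ν) (k a : κ)
    (v : ν) (x : ν) (hk : d.contains k = true) (hne : a ≠ k) :
    (d.insert a x).insert k v = (d.insert k v).insert a x := by
  apply PySem.Dict.ext
  have hka : (d.insert a x).contains k = true := by
    rw [PySem.Dict.contains_insert]; simp [hk]
  cases hca : d.contains a
  · have hka2 : (d.insert k v).contains a = false := by
      rw [PySem.Dict.contains_insert]; simp [hca, hne]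
    rw [PySem.Dict.items_insert_of_contains _ v hka,
        PySem.Dict.items_insert_of_not_contains d x hca,
        PySem.Dict.items_insert_of_not_contains _ x hka2,
        PySem.Dict.items_insert_of_contains d v hk]
    simp [hne]
  · have hka2 : (d.insert k v).contains a = true := by
      rw [PySem.Dict.contains_insert]; simp [hca]
    rw [PySem.Dict.items_insert_of_contains _ v hka,
        PySem.Dict.items_insert_of_contains d x hca,
        PySem.Dict.items_insert_of_contains _ x hka2,
        PySem.Dict.items_insert_of_contains d v hk]
    simp only [List.map_map]
    apply List.map_congr_left
    intro p _
    simp only [Function.comp_apply]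
    by_cases hpa : p.1 = a
    · simp [hpa, hne]
    · by_cases hpk : p.1 = k <;> simp [hpa, hpk, Ne.symm hne]

-- A final overwrite at a key already present and untouched by the fold can be pulled inside.
theorem pv_foldl_ins_insert {κ ν : Type} [BEq κ] [LawfulBEq κ] (l : List (κ × ν)) (k : κ) (v : ν) :
    ∀ d : PySem.Dict κ ν, d.contains k = true → (∀ p ∈ l, p.1 ≠ k) →
      (l.foldl (fun d p => d.insert p.1 p.2) d).insert k v
        = l.foldl (fun d p => d.insert p.1 p.2) (d.insert k v) := by
  induction l with
  | nil => intro d _ _; rfl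
  | cons a t ih =>
    intro d hk hl
    simp only [List.foldl_cons]
    rw [ih (d.insert a.1 a.2)
          (by rw [PySem.Dict.contains_insert]; simp [hk])
          (fun p hp => hl p (List.mem_cons_of_mem _ hp)),
        pv_insert_comm d k a.1 v a.2 hk (hl a List.mem_cons_self)]

-- Folding the items of (mk l).insert k v equals folding l and then inserting (k, v).
theorem pv_items_insert_foldl {κ ν : Type} [BEq κ] [LawfulBEq κ] (l : List (κ × ν)) (k : κ) (v : ν) :
    ∀ d : PySem.Dict κ ν, (l.map Prod.fst).Nodup →
      ((PySem.Dict.mk l).insert k v).items.foldl (fun d p => d.insert p.1 p.2) d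
        = (l.foldl (fun d p => d.insert p.1 p.2) d).insert k v := by
  induction l with
  | nil =>
    intro d _
    rw [PySem.Dict.items_insert_of_not_contains _ v (by rw [PySem.Dict.contains_mk]; simp)]
    rfl
  | cons a t ih =>
    intro d hnd
    simp only [List.map_cons, List.nodup_cons, List.mem_map] at hnd
    obtain ⟨hne0, htnd⟩ := hnd
    have hafst : ∀ p ∈ t, p.1 ≠ a.1 := fun p hp h => hne0 ⟨p, hp, h⟩
    by_cases hak : a.1 = k
    · have hc : (PySem.Dict.mk (a :: t)).contains k = true := by
        rw [PySem.Dict.contains_mk]; simp [hak]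
      rw [PySem.Dict.items_insert_of_contains _ v hc]
      have htid : t.map (fun p => if (p.1 == k) = true then (k, v) else p) = t := by
        have hid : ∀ p ∈ t, (if (p.1 == k) = true then (k, v) else p) = id p := by
          intro p hp
          have : p.1 ≠ k := fun h => hafst p hp (h.trans hak.symm)
          simp [this]
        rw [List.map_congr_left hid, List.map_id]
      simp only [List.map_cons, hak, beq_self_eq_true, if_true, htid, List.foldl_cons]
      rw [pv_foldl_ins_insert t k v (d.insert k a.2) (PySem.Dict.contains_insert_self d k a.2)
            (fun p hp h => hafst p hp (h.trans hak.symm)),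
          PySem.Dict.insert_insert_self]
    · have hsplit : ((PySem.Dict.mk (a :: t)).insert k v).items
          = a :: ((PySem.Dict.mk t).insert k v).items := by
        cases hc : (PySem.Dict.mk t).contains k
        · have hc2 : (PySem.Dict.mk (a :: t)).contains k = false := by
            rw [PySem.Dict.contains_mk] at hc ⊢
            simp only [List.any_cons, hc, Bool.or_false]
            simp [hak]
          rw [PySem.Dict.items_insert_of_not_contains _ v hc2,
              PySem.Dict.items_insert_of_not_contains _ v hc]
          rfl
        · have hc2 : (PySem.Dict.mk (a :: t)).contains k = true := by
            rw [PySem.Dict.contains_mk] at hc ⊢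
            simp [hc]
          rw [PySem.Dict.items_insert_of_contains _ v hc2,
              PySem.Dict.items_insert_of_contains _ v hc]
          simp [hak]
      rw [hsplit]
      simp only [List.foldl_cons]
      exact ih (d.insert a.1 a.2) htnd

-- Replaying the items of a dict built by insert-folding pairs equals folding the pairs directly.
theorem pv_foldl_items {κ ν : Type} [BEq κ] [LawfulBEq κ] (pairs : List (κ × ν)) :
    ∀ d : PySem.Dict κ ν,
      (pairs.foldl (fun d p => d.insert p.1 p.2) PySem.Dict.empty).items.foldl
          (fun d p => d.insert p.1 p.2) d
        = pairs.foldl (fun d p => d.insert p.1 p.2) d := by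
  induction pairs using List.reverseRecOn with
  | nil => intro d; rfl
  | append_singleton t p ih =>
    intro d
    rw [List.foldl_append, List.foldl_append]
    simp only [List.foldl_cons, List.foldl_nil]
    have hnd : (((t.foldl (fun d p => d.insert p.1 p.2) PySem.Dict.empty).items).map Prod.fst).Nodup := by
      have := PySem.Dict.nodup_keys_foldl_insert_key (ν := ν) t Prod.fst (fun _ p => p.2)
        PySem.Dict.empty (by simp [PySem.Dict.keys_mk, PySem.Dict.empty])
      simpa [PySem.Dict.keys_mk] using this
    calc ((t.foldl (fun d p => d.insert p.1 p.2) PySem.Dict.empty).insert p.1 p.2).items.foldl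
            (fun d p => d.insert p.1 p.2) d
        = ((PySem.Dict.mk ((t.foldl (fun d p => d.insert p.1 p.2) PySem.Dict.empty).items)).insert
            p.1 p.2).items.foldl (fun d p => d.insert p.1 p.2) d := rfl
      _ = (((t.foldl (fun d p => d.insert p.1 p.2) PySem.Dict.empty).items).foldl
            (fun d p => d.insert p.1 p.2) d).insert p.1 p.2 :=
          pv_items_insert_foldl _ p.1 p.2 d hnd
      _ = (t.foldl (fun d p => d.insert p.1 p.2) d).insert p.1 p.2 := by rw [ih d]

-- ===== new machinery relating dict items to B's scan =====

-- the emitted pair for a key: last value, found by scanning the pairs backwards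
def pvEmit (P : List (String × String)) (k : String) : Option (String × String) :=
  (P.reverse.find? (fun p => p.1 == k)).map (fun p => (k, p.2))

-- the keys in first-occurrence order, with an initial seen set
def pvKeys : List (String × String) → PySem.Set String → List String
  | [], _ => []
  | (k, _) :: rest, seen =>
    if PySem.Set.contains seen k then pvKeys rest seen
    else k :: pvKeys rest (PySem.Set.add seen k)

theorem pvScan_eq (P : List (String × String)) :
    ∀ (l : List (String × String)) (S : PySem.Set String),
      pvScan l S P = (pvKeys l S).filterMap
        (fun k => (pvEmit P k).map (fun kv => kv.1 ++ "=" ++ kv.2)) := by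
  intro l
  induction l with
  | nil => intro S; rfl
  | cons a rest ih =>
    intro S
    show (if PySem.Set.contains S a.1 then pvScan rest S P
          else match P.reverse.find? (fun p => p.1 == a.1) with
            | some p => (a.1 ++ "=" ++ p.2) :: pvScan rest (PySem.Set.add S a.1) P
            | none => pvScan rest (PySem.Set.add S a.1) P) = _
    unfold pvKeys
    cases hc : PySem.Set.contains S a.1
    · simp only [Bool.false_eq_true, if_false]
      rw [List.filterMap_cons]
      unfold pvEmit
      cases hf : P.reverse.find? (fun p => p.1 == a.1) <;> simp [ih, pvEmit]
    · simp only [if_true, ih]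

theorem pvKeys_subset (l : List (String × String)) :
    ∀ (S : PySem.Set String) (k : String), k ∈ pvKeys l S → k ∈ l.map Prod.fst := by
  induction l with
  | nil => intro S k h; exact absurd h (by simp [pvKeys])
  | cons a rest ih =>
    intro S k h
    unfold pvKeys at h
    simp only [List.map_cons, List.mem_cons]
    cases hc : PySem.Set.contains S a.1 <;> rw [hc] at h
    · simp only [Bool.false_eq_true, if_false, List.mem_cons] at h
      rcases h with h | h
      · exact Or.inl h
      · exact Or.inr (ih _ k h)
    · exact Or.inr (ih _ k (by simpa using h))

theorem pvKeys_append (p : String × String) (t : List (String × String)) :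
    ∀ S : PySem.Set String,
      pvKeys (t ++ [p]) S
        = pvKeys t S ++ (if p.1 ∈ S ∨ p.1 ∈ t.map Prod.fst then [] else [p.1]) := by
  induction t with
  | nil =>
    intro S
    by_cases h : p.1 ∈ S
    · have hc : PySem.Set.contains S p.1 = true := (PySem.Set.contains_iff S p.1).mpr h
      simp [pvKeys]
    · have hc : PySem.Set.contains S p.1 = false := by
        cases hcc : PySem.Set.contains S p.1
        · rfl
        · exact absurd ((PySem.Set.contains_iff S p.1).mp hcc) h
      simp [pvKeys]

  | cons a rest ih =>
    intro S
    show pvKeys (a :: (rest ++ [p])) S = _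
    unfold pvKeys
    cases hc : PySem.Set.contains S a.1
    · simp only [Bool.false_eq_true, if_false]
      rw [ih (PySem.Set.add S a.1)]
      have hmem : (p.1 ∈ PySem.Set.add S a.1 ∨ p.1 ∈ rest.map Prod.fst)
          ↔ (p.1 ∈ S ∨ p.1 ∈ (a :: rest).map Prod.fst) := by
        rw [PySem.Set.mem_add]
        simp only [List.map_cons, List.mem_cons]
        tauto
      simp only [List.map_cons] at hmem ⊢
      by_cases h : p.1 ∈ S ∨ p.1 ∈ a.1 :: rest.map Prod.fst
      · rw [if_pos (hmem.mpr h), if_pos h]; simp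
      · rw [if_neg (fun hh => h (hmem.mp hh)), if_neg h]; simp
    · simp only [if_true]
      rw [ih S]
      have hc' : p.1 ∈ (a :: rest).map Prod.fst ↔ (p.1 = a.1 ∨ p.1 ∈ rest.map Prod.fst) := by
        simp
      have haS : a.1 ∈ S := (PySem.Set.contains_iff S a.1).mp hc
      have hiff : (p.1 ∈ S ∨ p.1 ∈ rest.map Prod.fst)
          ↔ (p.1 ∈ S ∨ p.1 ∈ (a :: rest).map Prod.fst) := by
        rw [hc']
        constructor
        · tauto
        · rintro (h | h | h)
          · exact Or.inl h
          · exact Or.inl (h ▸ haS)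
          · exact Or.inr h
      simp only [List.map_cons] at hiff ⊢
      by_cases h : p.1 ∈ S ∨ p.1 ∈ rest.map Prod.fst
      · rw [if_pos h, if_pos (hiff.mp h)]
      · rw [if_neg h, if_neg (fun hh => h (hiff.mpr hh))]

theorem pvEmit_append (p : String × String) (t : List (String × String)) (k : String) :
    pvEmit (t ++ [p]) k = if k = p.1 then some (k, p.2) else pvEmit t k := by
  unfold pvEmit
  rw [List.reverse_append]
  simp only [List.reverse_singleton, List.singleton_append]
  by_cases h : k = p.1
  · rw [List.find?_cons_of_pos (by simp [h]), h]
    simp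
  · rw [List.find?_cons_of_neg (by simp [Ne.symm h]), if_neg h]

theorem pvEmit_isSome (t : List (String × String)) (k : String)
    (h : k ∈ t.map Prod.fst) : ∃ v, pvEmit t k = some (k, v) := by
  unfold pvEmit
  cases hf : t.reverse.find? (fun p => p.1 == k)
  · exfalso
    rw [List.find?_eq_none] at hf
    simp only [List.mem_map] at h
    obtain ⟨q, hq, hqk⟩ := h
    exact absurd (by simp [hqk]) (hf q (by simp [hq]))
  · exact ⟨_, rfl⟩

-- the dict built by insert-folding contains exactly the pairs' keys
theorem pv_contains_foldl (t : List (String × String)) (k : String) :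
    (t.foldl (fun d p => d.insert p.1 p.2) PySem.Dict.empty).contains k = true
      ↔ k ∈ t.map Prod.fst := by
  induction t using List.reverseRecOn with
  | nil =>
    show (PySem.Dict.empty : PySem.Dict String String).contains k = true ↔ _
    rw [PySem.Dict.contains_empty]
    simp
  | append_singleton t p ih =>
    rw [List.foldl_append]
    simp only [List.foldl_cons, List.foldl_nil, PySem.Dict.contains_insert]
    simp only [List.map_append, List.map_cons, List.map_nil, List.mem_append, List.mem_cons]
    rw [Bool.or_eq_true, beq_iff_eq, ih]
    tauto

-- main characterization: the items of A's merged dict are B's scan output (as pairs)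
theorem pv_items_char (pairs : List (String × String)) :
    (pairs.foldl (fun d p => d.insert p.1 p.2) PySem.Dict.empty).items
      = (pvKeys pairs PySem.Set.empty).filterMap (pvEmit pairs) := by
  induction pairs using List.reverseRecOn with
  | nil => rfl
  | append_singleton t p ih =>
    rw [List.foldl_append]
    simp only [List.foldl_cons, List.foldl_nil]
    rw [pvKeys_append]
    have hempty : ¬ p.1 ∈ (PySem.Set.empty : PySem.Set String) := by
      simp [PySem.Set.empty]
    by_cases hmem : p.1 ∈ t.map Prod.fst
    · -- key already present: in-place overwrite
      have hcond : (p.1 ∈ (PySem.Set.empty : PySem.Set String) ∨ p.1 ∈ t.map Prod.fst) := Or.inr hmem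
      rw [if_pos hcond, List.append_nil]
      have hcont : (t.foldl (fun d p => d.insert p.1 p.2) PySem.Dict.empty).contains p.1 = true :=
        (pv_contains_foldl t p.1).mpr hmem
      rw [PySem.Dict.items_insert_of_contains _ p.2 hcont, ih, ← List.filterMap_eq_map,
          List.filterMap_filterMap]
      apply List.filterMap_congr
      intro k hk
      have hkt : k ∈ t.map Prod.fst := pvKeys_subset t _ k hk
      rw [pvEmit_append]
      by_cases hkp : k = p.1
      · obtain ⟨v, hv⟩ := pvEmit_isSome t k hkt
        rw [if_pos hkp, hv]
        simp [hkp]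
      · obtain ⟨v, hv⟩ := pvEmit_isSome t k hkt
        rw [if_neg hkp, hv]
        simp [hkp]
    · -- fresh key: appended at the end
      have hcond : ¬ (p.1 ∈ (PySem.Set.empty : PySem.Set String) ∨ p.1 ∈ t.map Prod.fst) := by
        rintro (h | h)
        · exact hempty h
        · exact hmem h
      rw [if_neg hcond]
      have hcont : (t.foldl (fun d p => d.insert p.1 p.2) PySem.Dict.empty).contains p.1 = false := by
        cases hc : (t.foldl (fun d p => d.insert p.1 p.2) PySem.Dict.empty).contains p.1
        · rfl
        · exact absurd ((pv_contains_foldl t p.1).mp hc) hmem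
      rw [PySem.Dict.items_insert_of_not_contains _ p.2 hcont, ih, List.filterMap_append]
      congr 1
      · apply List.filterMap_congr
        intro k hk
        have hkt : k ∈ t.map Prod.fst := pvKeys_subset t _ k hk
        rw [pvEmit_append, if_neg (fun (h : k = p.1) => hmem (h ▸ hkt))]
      · rw [List.filterMap_cons, List.filterMap_nil, pvEmit_append, if_pos rfl]

theorem pv_main (kb eff : List String) : apply_effects kb eff = apply_effects_alt kb eff := by
  show ((eff.foldl applyEffectsParseStep PySem.Dict.empty).items.foldl (fun d p => d.insert p.1 p.2)
          (kb.foldl applyEffectsParseStep PySem.Dict.empty)).items.map (fun kv => kv.1 ++ "=" ++ kv.2)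
      = pvScan (pvPairsOf (kb ++ eff)) PySem.Set.empty (pvPairsOf (kb ++ eff))
  have hpairs : pvPairsOf (kb ++ eff) = (kb ++ eff).filterMap pvParse := by
    unfold pvPairsOf
    rw [pvPairsOf_eq]
    simp
  rw [hpairs, pvScan_eq, ← List.map_filterMap, ← pv_items_char,
      pv_foldl_step_eq kb, pv_foldl_step_eq eff, pv_foldl_items,
      ← List.foldl_append, ← List.filterMap_append]

-- ===== VERDICT (by name: the statement is the Claim_ definition above) =====
theorem apply_effects_spec : Claim_equal_apply_effects := by
  intro kb eff _
  show apply_effects kb eff = apply_effects_alt kb eff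
  exact pv_main kb eff
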